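-- pv_equiv track=rewrite | github.com/JoshWong0192/Steg | steg.py | hide_message
-- ===== SOURCE A (Python) =====
-- def get_index_positions(list_of_elems, element):
--     ''' Find the position of certain element within a list '''
--     index_pos_list = []
--     for i in range(len(list_of_elems)):
--         if list_of_elems[i] == element:
--             index_pos_list.append(i)
--
--     return index_pos_list
--
-- def hide_message(textlst,binlst):
--
--  position = get_index_positions(textlst, ' ') #Get the position of the spaces within the text
--
--  for i in range(0, len(binlst)):
--
--    if i < len(position): #Check if there are any spaces to be replaced with blank character, if all spaces have been replaced then the blank character will be appended at the end of the text.
--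
--      if binlst[i] == 1:
--
--          textlst[position[i]] = 'ﾠ' #Unicode-65440 for '1', replace the space with blank character
--
--      elif binlst[i] == 0:
--
--          textlst[position[i]] = '⠀' #Unicode-10240 for '0'
--
--    else: #If there is no more space left in the text, append the character at the end of the text
--      if binlst[i] == 1:
--
--          textlst.append('ﾠ') #Unicode-65440 for '1'
--
--      elif binlst[i] == 0:
--
--          textlst.append('⠀') #Unicode-10240 for '0'
--
--
--  steg_text = ''.join(textlst)
--
--
--  return steg_text
-- ===== SOURCE B (Python) =====
-- def hide_message(textlst, binlst):
--     j = 0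
--     for idx in range(len(textlst)):
--         if j >= len(binlst):
--             break
--         if textlst[idx] == ' ':
--             if binlst[j] == 1:
--                 textlst[idx] = 'ﾠ'
--             elif binlst[j] == 0:
--                 textlst[idx] = '⠀'
--             j += 1
--     while j < len(binlst):
--         if binlst[j] == 1:
--             textlst.append('ﾠ')
--         elif binlst[j] == 0:
--             textlst.append('⠀')
--         j += 1
--     return ''.join(textlst)
-- ===== Notes on version B (the rewrite author's own statement) =====
-- stated objective: simpler
-- what changed: Drops get_index_positions and the precomputed position table: one interleaved pass walks the text with a bit counter, replacing each space as it is met, then a single tail loop appends leftover bits; same in-place mutation of textlst.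
import Mathlib
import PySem

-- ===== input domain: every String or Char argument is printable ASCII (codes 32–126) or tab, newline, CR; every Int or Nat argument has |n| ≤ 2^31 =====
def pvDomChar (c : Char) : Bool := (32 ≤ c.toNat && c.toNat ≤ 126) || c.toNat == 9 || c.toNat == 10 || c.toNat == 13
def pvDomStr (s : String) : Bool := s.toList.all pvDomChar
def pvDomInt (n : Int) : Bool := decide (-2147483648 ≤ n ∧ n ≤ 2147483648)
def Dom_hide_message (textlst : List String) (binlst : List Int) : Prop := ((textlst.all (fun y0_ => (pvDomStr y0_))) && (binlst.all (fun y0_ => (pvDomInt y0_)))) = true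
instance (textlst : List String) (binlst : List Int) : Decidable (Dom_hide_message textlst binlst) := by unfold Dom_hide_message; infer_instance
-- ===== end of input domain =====

-- B drops A's precomputed table of space positions for one interleaved pass (objective: simpler).
-- Both Pythons mutate textlst in place identically; the equivalence proved here is about the return value.

-- ===== PORT A =====
def get_index_positions (list_of_elems : List String) (element : String) : List Int :=
  (PySem.List.pyRange 0 (PySem.List.len list_of_elems) 1).foldl
    (fun index_pos_list i =>
      -- list_of_elems[i]: i ranges over range(len(..)), always in range, so the default is never used
      if PySem.List.pyGetD list_of_elems i "" == element then index_pos_list ++ [i] else index_pos_list)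
    []

def hide_message (textlst : List String) (binlst : List Int) : String :=
  let position := get_index_positions textlst " "
  let t :=
    (PySem.List.pyRange 0 (PySem.List.len binlst) 1).foldl
      (fun t i =>
        if i < PySem.List.len position then
          -- textlst[position[i]] = …: position[i] is a valid nonnegative index, so pySetD/the default are exact
          if PySem.List.pyGetD binlst i 0 == 1 then
            PySem.List.pySetD t (PySem.List.pyGetD position i 0) "ﾠ"
          else if PySem.List.pyGetD binlst i 0 == 0 then
            PySem.List.pySetD t (PySem.List.pyGetD position i 0) "⠀"
          else t
        else
          if PySem.List.pyGetD binlst i 0 == 1 then t ++ ["ﾠ"]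
          else if PySem.List.pyGetD binlst i 0 == 0 then t ++ ["⠀"]
          else t)
      textlst
  PySem.Str.join "" t

-- ===== PORT B =====
-- walks the text once, consuming bits at each space (the Python's counter j becomes the list of remaining bits)
def hm_replace : List String → List Int → List String × List Int
  | [], bs => ([], bs)
  | t :: ts, [] => (t :: ts, [])
  | t :: ts, b :: bs =>
    if t == " " then
      let t' := if b == 1 then "ﾠ" else if b == 0 then "⠀" else t
      let r := hm_replace ts bs
      (t' :: r.1, r.2)
    else
      let r := hm_replace ts (b :: bs)
      (t :: r.1, r.2)

-- the trailing while loop: append a glyph for each leftover bit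
def hm_append : List Int → List String
  | [] => []
  | b :: bs => (if b == 1 then ["ﾠ"] else if b == 0 then ["⠀"] else []) ++ hm_append bs

def hide_message_alt (textlst : List String) (binlst : List Int) : String :=
  let r := hm_replace textlst binlst
  PySem.Str.join "" (r.1 ++ hm_append r.2)


-- ===== PRECONDITION & SPEC =====
def Spec_hide_message (textlst : List String) (binlst : List Int) (out : String) : Prop := out = hide_message_alt textlst binlst
instance (textlst : List String) (binlst : List Int) (out : String) : Decidable (Spec_hide_message textlst binlst out) := by unfold Spec_hide_message; infer_instance

-- ===== CLAIM (what is proved, stated in full; the proofs are below) =====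
def Claim_equal_hide_message : Prop := ∀ (textlst : List String) (binlst : List Int), Dom_hide_message textlst binlst → Spec_hide_message textlst binlst (hide_message textlst binlst)

-- ===== LEMMAS AND PROOFS =====

def stepA (pos : List Int) (bin : List Int) (t : List String) (k : Nat) : List String :=
  if k < pos.length then
    if bin.getD k 0 == 1 then PySem.List.pySetD t (pos.getD k 0) "ﾠ"
    else if bin.getD k 0 == 0 then PySem.List.pySetD t (pos.getD k 0) "⠀"
    else t
  else
    if bin.getD k 0 == 1 then t ++ ["ﾠ"] else if bin.getD k 0 == 0 then t ++ ["⠀"] else t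

def spacePos : List String → List Int
  | [] => []
  | t :: ts => (if t == " " then [0] else []) ++ (spacePos ts).map (· + 1)

theorem gip_filter (l : List String) (e : String) :
    get_index_positions l e
      = ((List.range l.length).filter (fun k => l.getD k "" == e)).map (fun k => (k : Int)) := by
  unfold get_index_positions
  have h := PySem.List.foldl_append_if (fun i => PySem.List.pyGetD l i "" == e)
      (id (α := Int)) (PySem.List.pyRange 0 (PySem.List.len l)) []
  simp only [id] at h
  rw [h]
  simp only [PySem.List.len_eq, PySem.List.pyRange_one, List.filter_map, List.map_map]
  simp [Function.comp_def]
  exact List.map_eq_flatMap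

theorem gip_eq_spacePos (l : List String) : get_index_positions l " " = spacePos l := by
  induction l with
  | nil => simp [gip_filter, spacePos]
  | cons x ls ih =>
    rw [gip_filter] at ih ⊢
    simp only [spacePos, List.length_cons, List.range_succ_eq_map, List.filter_cons,
      List.filter_map, Function.comp_def, List.getD_cons_zero, List.getD_cons_succ,
      Nat.succ_eq_add_one]
    rw [← ih]
    by_cases h : x == " " <;>
      simp only [h, if_pos, Bool.false_eq_true, ite_false,
        List.nil_append, List.cons_append] <;>
      simp <;>
      (simp only [← List.map_eq_flatMap, List.map_map, Function.comp_def]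
       exact List.map_congr_left (fun a _ => by push_cast; ring))

-- generic: a fold whose every step commutes with a fixed cons
theorem foldl_cons_hom {α : Type} (F G : List String → α → List String) (x : String)
    (h : ∀ acc k, F (x :: acc) k = x :: G acc k) :
    ∀ (l : List α) (t : List String), List.foldl F (x :: t) l = x :: List.foldl G t l := by
  intro l
  induction l with
  | nil => intro t; rfl
  | cons a as ih => intro t; simp only [List.foldl_cons, h]; exact ih _

theorem spacePos_nonneg : ∀ ts : List String, ∀ p ∈ spacePos ts, 0 ≤ p := by
  intro ts
  induction ts with
  | nil => simp [spacePos]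
  | cons t ts ih =>
    intro p hp
    simp only [spacePos, List.mem_append, List.mem_map] at hp
    rcases hp with hp | ⟨q, hq, rfl⟩
    · split at hp <;> simp_all
    · have := ih q hq; omega

-- setting index p+1 on x :: t is x :: setting index p, for 0 ≤ p
theorem pySetD_cons_succ (x : String) (t : List String) (p : Int) (hp : 0 ≤ p) (v : String) :
    PySem.List.pySetD (x :: t) (p + 1) v = x :: PySem.List.pySetD t p v := by
  rw [PySem.List.pySetD_of_nonneg _ v (by omega), PySem.List.pySetD_of_nonneg _ v hp]
  have : (p + 1).toNat = p.toNat + 1 := by omega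
  rw [this]
  rfl

-- A's step on a shifted position table commutes with cons
theorem stepA_shift (pos bin : List Int) (hpos : ∀ p ∈ pos, 0 ≤ p) (x : String) :
    ∀ acc k, stepA (pos.map (· + 1)) bin (x :: acc) k = x :: stepA pos bin acc k := by
  intro acc k
  unfold stepA
  simp only [List.length_map]
  by_cases hk : k < pos.length
  · have hget : (pos.map (· + 1)).getD k 0 = pos.getD k 0 + 1 := by
      rw [List.getD_eq_getElem _ _ (by simpa using hk), List.getD_eq_getElem _ _ hk]
      simp
    have h0 : 0 ≤ pos.getD k 0 := by
      rw [List.getD_eq_getElem _ _ hk]; exact hpos _ (List.getElem_mem hk)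
    simp only [hk, if_pos, hget]
    split_ifs <;>
      first
      | exact pySetD_cons_succ _ _ _ h0 _
      | rfl
  · simp only [hk, if_neg, not_false_iff]
    split_ifs <;> simp

-- A's step with a space consumed at the head: index k+1 on (0 :: shifted table, b :: bs)
theorem stepA_space_shift (pos bs : List Int) (b : Int)
    (hpos : ∀ p ∈ pos, 0 ≤ p) (x : String) :
    ∀ acc k, stepA (0 :: pos.map (· + 1)) (b :: bs) (x :: acc) (k + 1) = x :: stepA pos bs acc k := by
  intro acc k
  unfold stepA
  simp only [List.length_cons, List.length_map, List.getD_cons_succ, Nat.add_lt_add_iff_right]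
  by_cases hk : k < pos.length
  · have hget : (pos.map (· + 1)).getD k 0 = pos.getD k 0 + 1 := by
      rw [List.getD_eq_getElem _ _ (by simpa using hk), List.getD_eq_getElem _ _ hk]
      simp
    have h0 : 0 ≤ pos.getD k 0 := by
      rw [List.getD_eq_getElem _ _ hk]; exact hpos _ (List.getElem_mem hk)
    simp only [hk, if_pos, hget]
    split_ifs <;>
      first
      | exact pySetD_cons_succ _ _ _ h0 _
      | rfl
  · simp only [hk, if_neg, not_false_iff]
    split_ifs <;> simp

theorem foldl_map_succ {F G : List String → Nat → List String}
    (h : ∀ acc k, F acc (k + 1) = G acc k) (l : List Nat) (t : List String) :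
    List.foldl F t (l.map Nat.succ) = List.foldl G t l := by
  rw [List.foldl_map]
  have : (fun (acc : List String) (k : Nat) => F acc (Nat.succ k)) = G := by
    funext acc k; exact h acc k
  rw [this]

-- the append phase: with an empty position table A's loop only appends glyphs
theorem appendPhase : ∀ (bs : List Int) (t : List String),
    List.foldl (stepA [] bs) t (List.range bs.length) = t ++ hm_append bs := by
  intro bs
  induction bs with
  | nil => intro t; simp [hm_append]
  | cons b bs ih =>
    intro t
    rw [List.length_cons, List.range_succ_eq_map, List.foldl_cons,
      foldl_map_succ (G := stepA [] bs) (by intro acc k; unfold stepA; simp), ih,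
      show stepA [] (b :: bs) t 0
          = t ++ (if b == 1 then ["ﾠ"] else if b == 0 then ["⠀"] else []) from by
        unfold stepA; split_ifs <;> simp_all,
      show hm_append (b :: bs)
          = (if b == 1 then ["ﾠ"] else if b == 0 then ["⠀"] else []) ++ hm_append bs from rfl,
      List.append_assoc]

theorem hm_replace_nil (ts : List String) : hm_replace ts [] = (ts, []) := by
  cases ts <;> rfl

-- MAIN: A's fold over the position table equals B's interleaved pass
theorem coreA_eq : ∀ (ts : List String) (bs : List Int),
    List.foldl (stepA (spacePos ts) bs) ts (List.range bs.length)
      = (hm_replace ts bs).1 ++ hm_append (hm_replace ts bs).2 := by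
  intro ts
  induction ts with
  | nil => intro bs; simp only [spacePos, hm_replace]; exact appendPhase bs []
  | cons t ts ih =>
    intro bs
    by_cases h : t == " "
    · have ht : t = " " := by simpa using h
      subst ht
      cases bs with
      | nil => simp [hm_replace, spacePos, hm_append]
      | cons b bs' =>
        simp only [spacePos, if_pos h, List.singleton_append, List.length_cons,
          List.range_succ_eq_map, List.foldl_cons]
        have hstep0 : stepA (0 :: (spacePos ts).map (· + 1)) (b :: bs') (" " :: ts) 0
            = (if b == 1 then "ﾠ" else if b == 0 then "⠀" else " ") :: ts := by
          unfold stepA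
          simp only [List.length_cons, List.getD_cons_zero]
          have hset : ∀ v, PySem.List.pySetD (" " :: ts) 0 v = v :: ts := by
            intro v; rw [PySem.List.pySetD_of_nonneg _ v le_rfl]; rfl
          split_ifs <;> first | (exfalso; omega) | simp [hset]
        rw [hstep0, List.foldl_map,
          foldl_cons_hom _ _ _
            (fun acc k => stepA_space_shift (spacePos ts) bs' b (spacePos_nonneg ts) _ acc k),
          ih bs']
        simp [hm_replace]
    · simp only [spacePos, if_neg h, List.nil_append]
      rw [foldl_cons_hom _ _ t (stepA_shift (spacePos ts) bs (spacePos_nonneg ts) t)]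
      rw [ih bs]
      cases bs with
      | nil => simp [hm_replace_nil, hm_append]
      | cons b bs' => simp [hm_replace, h]

-- bridge: the port's Int-indexed fold is stepA over List.range
theorem portA_eq (textlst : List String) (binlst : List Int) :
    hide_message textlst binlst
      = PySem.Str.join ""
          (List.foldl (stepA (spacePos textlst) binlst) textlst (List.range binlst.length)) := by
  unfold hide_message
  rw [gip_eq_spacePos]
  rw [PySem.List.len_eq, PySem.List.pyRange_one]
  simp only [Int.sub_zero, Int.toNat_natCast, List.foldl_map, zero_add,
    PySem.List.pyGetD_natCast, PySem.List.len_eq, Nat.cast_lt]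
  rfl

theorem hide_message_spec' (textlst : List String) (binlst : List Int) :
    hide_message textlst binlst = hide_message_alt textlst binlst := by
  rw [portA_eq, coreA_eq]
  rfl

-- ===== VERDICT (by name: the statement is the Claim_ definition above) =====
theorem hide_message_spec : Claim_equal_hide_message := by
  intro textlst binlst _
  unfold Spec_hide_message
  exact hide_message_spec' textlst binlst
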